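-- pv_equiv track=rewrite | github.com/ksu-is/40k-Calculator | Testing Dice.py | wound_counter
-- ===== SOURCE A (Python) =====
-- def wound_counter(T,S,input_list):
--     wounds_count=0
--
--     for wound in input_list:
--         #dice rolls of 1 are always a failure
--         #when Weapon Strength is greater than the targets toughness
--         if S>T:
--             #test if the strength is 2 times as great or more than the toughness
--             if S>=2*T:
--                 #if yes than dice rolls of 2+ cause wounds
--                 if wound >= 2:
--                     wounds_count+=1
--             else:
--                 #if no then wound rolls of 3+ cause wounds
--                 if wound >=3:
--                     wounds_count+=1
--         if S==T:
--             #if strength is equal to toughness dice roll of 4+ cause wounds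
--             if wound >=4:
--                 wounds_count+=1
--         #when Weapon Strength is less than the targets toughness
--         if S<T:
--             #test if the toughness is 2 times as great or more than the weapon strength
--             if T>=2*S:
--                 #dice roll of 6+ is needed
--                 if wound==6:
--                     wounds_count+=1
--             else:
--                 #dice roll of 5+ is needed
--                 if wound >=5:
--                     wounds_count+=1
--     return wounds_count
-- ===== SOURCE B (Python) =====
-- def _wounds(T, S, v):
--     # Wound-success test for a single roll value v.
--     if S > T:
--         return v >= 2 if S >= 2 * T else v >= 3
--     if S == T:
--         return v >= 4
--     return v == 6 if T >= 2 * S else v >= 5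
--
--
-- def wound_counter(T, S, input_list):
--     # Histogram pass: tally each distinct roll value once.
--     freq = {}
--     for w in input_list:
--         freq[w] = freq.get(w, 0) + 1
--     # Aggregate pass: evaluate the wound test once per DISTINCT value,
--     # adding that value's whole tally in one step.
--     total = 0
--     for v, c in freq.items():
--         if _wounds(T, S, v):
--             total += c
--     return total
-- ===== Notes on version B (the rewrite author's own statement) =====
-- stated objective: alternative
-- what changed: B builds a frequency histogram (Counter-style dict) of the rolls in one pass and then aggregates whole buckets per distinct value, instead of A's per-element nested T/S branch cascade; the wound test runs once per distinct value rather than once per element.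
import Mathlib
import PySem

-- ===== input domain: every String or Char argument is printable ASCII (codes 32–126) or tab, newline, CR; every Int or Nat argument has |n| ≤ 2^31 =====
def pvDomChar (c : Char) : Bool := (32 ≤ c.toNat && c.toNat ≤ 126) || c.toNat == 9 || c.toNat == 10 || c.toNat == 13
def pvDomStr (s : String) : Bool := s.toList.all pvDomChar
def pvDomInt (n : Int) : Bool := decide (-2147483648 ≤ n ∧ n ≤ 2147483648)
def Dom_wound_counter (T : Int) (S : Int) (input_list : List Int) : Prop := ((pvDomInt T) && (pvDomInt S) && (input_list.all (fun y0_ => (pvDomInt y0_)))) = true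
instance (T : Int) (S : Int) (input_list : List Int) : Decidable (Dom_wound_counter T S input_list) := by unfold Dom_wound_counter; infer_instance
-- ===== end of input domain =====

-- B tallies the rolls into a frequency dict in one pass, then adds whole buckets per
-- distinct value in a second pass (objective: alternative; same return value as A).


-- ===== PORT A =====
def wound_counter (T : Int) (S : Int) (input_list : List Int) : Int :=
  input_list.foldl (fun wounds_count wound =>
    -- if S>T: …
    let wounds_count :=
      if S > T then
        if S ≥ 2*T then (if wound ≥ 2 then wounds_count + 1 else wounds_count)
        else (if wound ≥ 3 then wounds_count + 1 else wounds_count)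
      else wounds_count
    -- if S==T: …
    let wounds_count :=
      if S = T then (if wound ≥ 4 then wounds_count + 1 else wounds_count)
      else wounds_count
    -- if S<T: …
    let wounds_count :=
      if S < T then
        if T ≥ 2*S then (if wound = 6 then wounds_count + 1 else wounds_count)
        else (if wound ≥ 5 then wounds_count + 1 else wounds_count)
      else wounds_count
    wounds_count) 0

-- ===== PORT B =====
-- _wounds(T, S, v) from Source B
def woundHits (T : Int) (S : Int) (v : Int) : Bool :=
  if S > T then (if S ≥ 2*T then v ≥ 2 else v ≥ 3)
  else if S = T then v ≥ 4
  else if T ≥ 2*S then v == 6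
  else v ≥ 5

def wound_counter_alt (T : Int) (S : Int) (input_list : List Int) : Int :=
  -- freq = {}; for w: freq[w] = freq.get(w, 0) + 1
  let freq : PySem.Dict Int Int :=
    input_list.foldl (fun d w => d.modify w 0 (· + 1)) PySem.Dict.empty
  -- total = 0; for v, c in freq.items(): if _wounds(T,S,v): total += c
  freq.items.foldl (fun total vc => if woundHits T S vc.1 then total + vc.2 else total) 0

-- ===== PRECONDITION & SPEC =====
def Spec_wound_counter (T : Int) (S : Int) (input_list : List Int) (out : Int) : Prop := out = wound_counter_alt T S input_list
instance (T : Int) (S : Int) (input_list : List Int) (out : Int) : Decidable (Spec_wound_counter T S input_list out) := by unfold Spec_wound_counter; infer_instance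

-- ===== CLAIM (what is proved, stated in full; the proofs are below) =====
def Claim_equal_wound_counter : Prop := ∀ (T : Int) (S : Int) (input_list : List Int), Dom_wound_counter T S input_list → Spec_wound_counter T S input_list (wound_counter T S input_list)

-- ===== LEMMAS AND PROOFS =====

-- A's loop body (the three sequential if-blocks) is one increment guarded by woundHits
lemma woundA_step (T S acc w : Int) :
    (let a1 :=
      if S > T then
        if S ≥ 2*T then (if w ≥ 2 then acc + 1 else acc)
        else (if w ≥ 3 then acc + 1 else acc)
      else acc
     let a2 := if S = T then (if w ≥ 4 then a1 + 1 else a1) else a1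
     let a3 :=
      if S < T then
        if T ≥ 2*S then (if w = 6 then a2 + 1 else a2)
        else (if w ≥ 5 then a2 + 1 else a2)
      else a2
     a3)
    = (if woundHits T S w then acc + 1 else acc) := by
  rcases lt_trichotomy S T with h | h | h
  · have h1 : ¬ S > T := not_lt_of_gt h
    have h2 : S ≠ T := ne_of_lt h
    simp only [woundHits, if_neg h1, if_neg h2, if_pos h]
    by_cases h3 : T ≥ 2*S <;> simp only [if_pos, if_neg, h3] <;> split_ifs <;> simp_all <;> omega
  · subst h
    simp only [woundHits, gt_iff_lt, lt_irrefl, if_neg (lt_irrefl S), if_pos rfl, if_false]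
    split_ifs <;> simp_all <;> omega
  · have h1 : ¬ S < T := not_lt_of_gt h
    have h2 : S ≠ T := ne_of_gt h
    simp only [woundHits, if_pos h, if_neg h1, if_neg h2, gt_iff_lt]
    by_cases h3 : S ≥ 2*T <;> simp only [if_pos, if_neg, h3] <;> split_ifs <;> simp_all <;> omega

-- A's fold is the count of rolls satisfying woundHits
lemma woundA_eq_countP (T S : Int) (xs : List Int) :
    wound_counter T S xs = (xs.countP (fun w => woundHits T S w) : Int) := by
  have h := PySem.List.foldl_congr_mem (l := xs) (init := (0:Int))
    (f := fun (wounds_count wound : Int) =>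
      let wounds_count :=
        if S > T then
          if S ≥ 2*T then (if wound ≥ 2 then wounds_count + 1 else wounds_count)
          else (if wound ≥ 3 then wounds_count + 1 else wounds_count)
        else wounds_count
      let wounds_count :=
        if S = T then (if wound ≥ 4 then wounds_count + 1 else wounds_count)
        else wounds_count
      let wounds_count :=
        if S < T then
          if T ≥ 2*S then (if wound = 6 then wounds_count + 1 else wounds_count)
          else (if wound ≥ 5 then wounds_count + 1 else wounds_count)
        else wounds_count
      wounds_count)
    (g := fun acc w => if woundHits T S w then acc + 1 else acc)
    (fun acc w _ => woundA_step T S acc w)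
  unfold wound_counter
  rw [h, PySem.List.foldl_if_add_one]
  simp

-- a guarded bucket sum over a list equals the sum of a 0/ite map
lemma foldl_bucket_sum (p : Int → Bool) (l : List (Int × Int)) (a : Int) :
    l.foldl (fun total vc => if p vc.1 then total + vc.2 else total) a
      = a + (l.map (fun vc => if p vc.1 then vc.2 else 0)).sum := by
  induction l generalizing a with
  | nil => simp
  | cons h t ih => simp only [List.foldl_cons, List.map_cons, List.sum_cons, ih]; split_ifs <;> omega

-- summing the histogram's buckets whose value passes p counts exactly the passing rolls
lemma bucket_sum_eq_countP (p : Int → Bool) (xs : List Int) :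
    ((PySem.Set.ofList xs).map (fun k => if p k then (xs.count k : Int) else 0)).sum
      = (xs.countP p : Int) := by
  have hperm : (PySem.Set.ofList xs).Perm xs.dedup :=
    (List.perm_ext_iff_of_nodup (PySem.Set.nodup_ofList xs) xs.nodup_dedup).mpr
      (fun a => by simp [PySem.Set.mem_ofList])
  rw [List.Perm.sum_eq (hperm.map _)]
  rw [← List.sum_map_count_dedup_filter_eq_countP p xs]
  induction xs.dedup with
  | nil => simp
  | cons h t ih =>
    by_cases hp : p h <;> simp [List.filter_cons, hp, ih] <;> omega

-- ===== VERDICT (by name: the statement is the Claim_ definition above) =====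
theorem wound_counter_spec : Claim_equal_wound_counter := by
  intro T S xs _
  unfold Spec_wound_counter wound_counter_alt
  show wound_counter T S xs
      = (PySem.Dict.counter xs).items.foldl
          (fun total vc => if woundHits T S vc.1 then total + vc.2 else total) 0
  rw [PySem.Dict.items_counter, woundA_eq_countP, foldl_bucket_sum (woundHits T S)]
  rw [← bucket_sum_eq_countP (woundHits T S) xs]
  simp [List.map_map, Function.comp_def]
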